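-- pv_equiv track=rewrite | github.com/Arpan243/JPMC | string_replacement.py | findSmallestString
-- ===== SOURCE A (Python) =====
-- def findSmallestString(word, substr):
--     n = len(word)
--     m = len(substr)
--     best_word = None
--
--     # Try every possible position in `word` where `substr` can fit
--     for i in range(n - m + 1):
--         # Check if we can match `substr` starting at position `i`
--         possible = True
--         candidate = list(word)  # Make a copy of the word
--
--         for j in range(m):
--             if candidate[i + j] == '?' or candidate[i + j] == substr[j]:
--                 candidate[i + j] = substr[j]
--             else:
--                 possible = False
--                 break
--
--         if possible:
--             # Replace all remaining '?' with 'a' to make it lexicographically smallest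
--             for k in range(n):
--                 if candidate[k] == '?':
--                     candidate[k] = 'a'
--
--             # Convert candidate list back to a string
--             candidate_string = ''.join(candidate)
--
--             # Compare lexicographically
--             if best_word is None or candidate_string < best_word:
--                 best_word = candidate_string
--
--     # Return the best result found, or "-1" if no valid solution was found
--     return best_word if best_word else "-1"
-- ===== SOURCE B (Python) =====
-- def findSmallestString(word, substr):
--     n, m = len(word), len(substr)
--     base = word.replace('?', 'a')
--     fsub = substr.replace('?', 'a')
--
--     def ch(x, p):
--         # character at position p of the candidate with substr placed at x
--         return fsub[p - x] if x <= p < x + m else base[p]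
--
--     def better(i, b):
--         # candidate(i) < candidate(b) for b < i: the two candidates agree with
--         # `base` outside their placement windows, so compare only those windows
--         for p in list(range(b, b + m)) + list(range(max(i, b + m), i + m)):
--             ci, cb = ch(i, p), ch(b, p)
--             if ci != cb:
--                 return ci < cb
--         return False
--
--     best = None
--     for i in range(n - m + 1):
--         if all(wc == '?' or wc == sc for wc, sc in zip(word[i:i + m], substr)):
--             if best is None or better(i, best):
--                 best = i
--     return "-1" if best is None else base[:best] + fsub + base[best + m:]
-- ===== Notes on version B (the rewrite author's own statement) =====
-- stated objective: faster
-- what changed: B never materialises candidate strings: it precomputes the '?'-filled base and substring once, selects the best placement index by comparing only the two length-m deviation windows of a pair of candidates (they agree with base everywhere else), and builds the single answer string at the end, instead of A's per-position full word copy, '?'-rescan, join and full-string running-minimum comparison.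
-- intended difference: On word='' and substr='' the empty placement is valid so B returns '', while A's final truthiness test (best_word if best_word else "-1") mistakes the legitimate empty result for 'no match' and returns '-1'; B's value is the intended one. — e.g. on findSmallestString("", ""): A returns "-1", B returns ""
import Mathlib
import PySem

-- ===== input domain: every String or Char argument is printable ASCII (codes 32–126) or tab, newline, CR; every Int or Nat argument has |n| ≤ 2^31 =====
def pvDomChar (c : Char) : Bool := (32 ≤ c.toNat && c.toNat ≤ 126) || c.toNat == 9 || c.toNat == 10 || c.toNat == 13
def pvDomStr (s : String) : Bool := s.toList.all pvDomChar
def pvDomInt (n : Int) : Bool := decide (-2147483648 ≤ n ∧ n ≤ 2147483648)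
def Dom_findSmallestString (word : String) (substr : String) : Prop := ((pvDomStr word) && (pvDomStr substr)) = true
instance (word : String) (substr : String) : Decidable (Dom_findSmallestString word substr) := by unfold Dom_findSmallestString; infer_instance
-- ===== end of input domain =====

-- B never builds candidate strings: it picks the best placement index by comparing only the
-- length-m deviation windows of two candidates (they agree with the '?'->'a' base elsewhere) and
-- constructs the single answer at the end (objective: faster; A copies/fills/joins/compares whole
-- strings per position).

-- ===== PORT A =====
-- inner `for j in range(m)` loop with its break: walks the remaining substr chars,
-- mutating the candidate copy in place; `none` = `possible = False`
def aMatchLoop (cand : List Char) (s : List Char) (p : Nat) : Option (List Char) :=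
  match s with
  | [] => some cand
  | c :: rest =>
    match cand[p]? with
    | none => none
    | some ch => if ch == '?' || ch == c then aMatchLoop (cand.set p c) rest (p + 1) else none

def findSmallestString (word : String) (substr : String) : String :=
  let w := word.toList
  let s := substr.toList
  let n : Int := w.length
  let m : Int := s.length
  let best :=
    (PySem.List.pyRange 0 (n - m + 1) 1).foldl
      (fun best i =>
        match aMatchLoop w s i.toNat with
        | none => best
        | some cand =>
          let cs := String.ofList (cand.map (fun c => if c = '?' then 'a' else c))
          match best with
          | none => some cs
          | some b => if cs < b then some cs else some b)
      none
  match best with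
  | none => "-1"
  | some b => if b = "" then "-1" else b

-- ===== PORT B =====
def fillChar (c : Char) : Char := if c = '?' then 'a' else c

-- `ch(x, p)`: character at position p of the candidate with substr placed at x
-- (every call below has the index in range, so the `.getD 'a'` default is never used)
def bCh (base fsub : List Char) (m x p : Nat) : Char :=
  if x ≤ p ∧ p < x + m then (fsub[p - x]?).getD 'a' else (base[p]?).getD 'a'

-- the `for p in …` loop of `better`: first differing scanned position decides
def bBetterLoop (base fsub : List Char) (m i b : Nat) : List Nat → Bool
  | [] => false
  | p :: ps =>
    let ci := bCh base fsub m i p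
    let cb := bCh base fsub m b p
    if ci ≠ cb then decide (ci < cb) else bBetterLoop base fsub m i b ps

def bBetter (base fsub : List Char) (m i b : Nat) : Bool :=
  bBetterLoop base fsub m i b
    (List.range' b m ++ List.range' (max i (b + m)) (i + m - max i (b + m)))

def findSmallestString_alt (word : String) (substr : String) : String :=
  let w := word.toList
  let s := substr.toList
  let n : Int := w.length
  let m : Int := s.length
  let base := w.map fillChar
  let fsub := s.map fillChar
  let best :=
    (PySem.List.pyRange 0 (n - m + 1) 1).foldl
      (fun best i =>
        if ((PySem.List.slice w (some i) (some (i + m))).zip s).all (fun q => q.1 == '?' || q.1 == q.2) then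
          match best with
          | none => some i.toNat
          | some b => if bBetter base fsub s.length i.toNat b then some i.toNat else some b
        else best)
      none
  match best with
  | none => "-1"
  | some b => String.ofList (base.take b ++ fsub ++ base.drop (b + s.length))

-- ===== PRECONDITION & SPEC =====
-- On word = "" and substr = "" the only candidate is the empty string, which matches the
-- empty pattern, so B returns ""; A's final truthiness test `best_word if best_word else "-1"`
-- mistakes the legitimate empty result for "no solution" and returns "-1".
def D_findSmallestString (word : String) (substr : String) : Prop := word = "" ∧ substr = ""
instance (word : String) (substr : String) : Decidable (D_findSmallestString word substr) := by unfold D_findSmallestString; infer_instance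
def Spec_findSmallestString (word : String) (substr : String) (out : String) : Prop := ¬ D_findSmallestString word substr → out = findSmallestString_alt word substr
instance (word : String) (substr : String) (out : String) : Decidable (Spec_findSmallestString word substr out) := by unfold Spec_findSmallestString; infer_instance
def pvDiffWitness_findSmallestString : String × String := ("", "")
def pvDiffWitnessOut_findSmallestString : String × String := ("-1", "")

-- ===== CLAIM (what is proved, stated in full; the proofs are below) =====
def Claim_unchanged_findSmallestString : Prop := ∀ (word : String) (substr : String), Dom_findSmallestString word substr → Spec_findSmallestString word substr (findSmallestString word substr)
def Claim_changed_findSmallestString : Prop := Dom_findSmallestString (pvDiffWitness_findSmallestString.1) (pvDiffWitness_findSmallestString.2) ∧ D_findSmallestString (pvDiffWitness_findSmallestString.1) (pvDiffWitness_findSmallestString.2) ∧ findSmallestString (pvDiffWitness_findSmallestString.1) (pvDiffWitness_findSmallestString.2) = pvDiffWitnessOut_findSmallestString.1 ∧ findSmallestString_alt (pvDiffWitness_findSmallestString.1) (pvDiffWitness_findSmallestString.2) = pvDiffWitnessOut_findSmallestString.2 ∧ pvDiffWitnessOut_findSmallestString.1 ≠ pvDiffWitnessOut_findSmallestString.2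
def Claim_exact_findSmallestString : Prop := ∀ (word : String) (substr : String), Dom_findSmallestString word substr → D_findSmallestString word substr → findSmallestString word substr ≠ findSmallestString_alt word substr

-- ===== LEMMAS AND PROOFS =====

-- proof-only: the full candidate at placement x, expressed position by position
def candL (w s : List Char) (x : Nat) : List Char :=
  (List.range w.length).map (bCh (w.map fillChar) (s.map fillChar) s.length x)

theorem pv_set_take_succ : ∀ (l : List Char) (p : Nat) (c : Char), p < l.length → (l.set p c).take (p+1) = l.take p ++ [c]
  | x::xs, 0, c, _ => by simp
  | x::xs, p+1, c, h => by
      simp only [List.set_cons_succ, List.take_succ_cons, List.cons_append]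
      rw [pv_set_take_succ xs p c (by simpa using h)]

-- characterisation of A's inner matching loop
theorem aMatchLoop_eq : ∀ (s cand : List Char) (p : Nat), p + s.length ≤ cand.length →
    aMatchLoop cand s p =
      if (((cand.drop p).take s.length).zip s).all (fun q => q.1 == '?' || q.1 == q.2)
      then some (cand.take p ++ s ++ cand.drop (p + s.length)) else none
  | [], cand, p, h => by simp [aMatchLoop]
  | c :: rest, cand, p, h => by
    have hp : p < cand.length := by simp at h; omega
    rw [aMatchLoop, List.getElem?_eq_getElem hp]
    rw [List.drop_eq_getElem_cons hp]
    simp only [List.length_cons, List.take_succ_cons, List.zip_cons_cons, List.all_cons]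
    by_cases hc : (cand[p] == '?' || cand[p] == c) = true
    · rw [if_pos hc]
      rw [aMatchLoop_eq rest (cand.set p c) (p+1) (by simp; simp at h; omega)]
      have hdrop : (cand.set p c).drop (p+1) = cand.drop (p+1) := by simp [List.drop_set]
      rw [hdrop, hc, Bool.true_and]
      by_cases hall : (((cand.drop (p+1)).take rest.length).zip rest).all (fun q => q.1 == '?' || q.1 == q.2) = true
      · rw [if_pos hall, if_pos hall]
        rw [pv_set_take_succ cand p c hp]
        have heq : p + 1 + rest.length = p + (rest.length + 1) := by omega
        rw [heq]
        have hdrop2 : (cand.set p c).drop (p + (rest.length + 1)) = cand.drop (p + (rest.length + 1)) := by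
          apply List.drop_set_of_lt; omega
        rw [hdrop2]
        simp
      · simp [hall]
    · simp [hc]

-- a contiguous range of in-range positions mapped through safe indexing is a segment
theorem pv_map_range'_getD (l : List Char) : ∀ (t a : Nat), a + t ≤ l.length →
    (List.range' a t).map (fun p => (l[p]?).getD 'a') = (l.drop a).take t
  | 0, a, _ => by simp
  | t+1, a, h => by
    have ha : a < l.length := by omega
    rw [List.range'_succ, List.map_cons, pv_map_range'_getD l t (a+1) (by omega),
        List.getElem?_eq_getElem ha]
    conv_rhs => rw [← List.getElem_cons_drop ha]
    rw [List.take_succ_cons]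
    rfl

-- the position-by-position candidate equals base[:x] ++ fsub ++ base[x+m:]
theorem candL_eq (w s : List Char) (x : Nat) (hx : x + s.length ≤ w.length) :
    candL w s x = (w.map fillChar).take x ++ s.map fillChar ++ (w.map fillChar).drop (x + s.length) := by
  unfold candL
  have hn : w.length = x + s.length + (w.length - (x + s.length)) := by omega
  rw [List.range_eq_range', hn]
  rw [← List.range'_append_1 (s := 0) (m := x + s.length), ← List.range'_append_1 (s := 0) (m := x)]
  simp only [Nat.zero_add, List.map_append]
  congr 1
  · congr 1
    · rw [List.map_congr_left (g := fun p => ((w.map fillChar)[p]?).getD 'a')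
        (by intro p hp; rw [List.mem_range'_1] at hp
            simp only [bCh]; rw [if_neg (by omega)]),
        pv_map_range'_getD _ x 0 (by simp; omega), List.drop_zero]
    · rw [List.map_congr_left (g := fun p => ((s.map fillChar)[p - x]?).getD 'a')
        (by intro p hp; rw [List.mem_range'_1] at hp
            simp only [bCh]; rw [if_pos (by omega)]),
        List.range'_eq_map_range, List.map_map]
      have hcomp : ((fun p => ((s.map fillChar)[p - x]?).getD 'a') ∘ (x + ·)) = fun j => ((s.map fillChar)[j]?).getD 'a' := by
        funext j; simp
      rw [hcomp, List.range_eq_range', pv_map_range'_getD _ s.length 0 (by simp)]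
      simp
  · rw [List.map_congr_left (g := fun p => ((w.map fillChar)[p]?).getD 'a')
      (by intro p hp; rw [List.mem_range'_1] at hp
          simp only [bCh]; rw [if_neg (by omega)]),
      pv_map_range'_getD _ _ _ (by simp; omega), List.take_of_length_le (by simp)]

-- outside the union of the two placement windows the candidates agree
theorem bCh_agree (base fsub : List Char) (m i b p : Nat) (hbi : b < i)
    (h : p < b ∨ (b + m ≤ p ∧ p < i) ∨ i + m ≤ p) :
    bCh base fsub m i p = bCh base fsub m b p := by
  simp only [bCh]
  rcases h with h | ⟨h1, h2⟩ | h <;> rw [if_neg (by omega), if_neg (by omega)]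

-- lexicographic comparison ignores a common prefix
theorem pv_lex_prefix (u l1 l2 : List Char) : (u ++ l1 < u ++ l2) ↔ l1 < l2 := by
  induction u with
  | nil => rfl
  | cons a t ih => simp [ih]

-- … and, for equal-length fronts, a common suffix
theorem pv_lex_suffix : ∀ (l1 l2 : List Char), l1.length = l2.length → ∀ (u : List Char),
    (l1 ++ u < l2 ++ u) ↔ l1 < l2
  | [], [], _, u => by simp
  | [], y :: l2, h, u => by simp at h
  | x :: l1, [], h, u => by simp at h
  | x :: l1, y :: l2, h, u => by
    simp only [List.cons_append, List.cons_lt_cons_iff]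
    rw [pv_lex_suffix l1 l2 (by simpa using h) u]

-- … and, for equal-length fronts, a common middle segment
theorem pv_lex_mid : ∀ (l1 l2 : List Char), l1.length = l2.length → ∀ (u t1 t2 : List Char),
    (l1 ++ u ++ t1 < l2 ++ u ++ t2) ↔ (l1 ++ t1 < l2 ++ t2)
  | [], [], _, u, t1, t2 => by simpa using pv_lex_prefix u t1 t2
  | [], y :: l2, h, _, _, _ => by simp at h
  | x :: l1, [], h, _, _, _ => by simp at h
  | x :: l1, y :: l2, h, u, t1, t2 => by
    simp only [List.cons_append, List.cons_lt_cons_iff]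
    rw [pv_lex_mid l1 l2 (by simpa using h) u t1 t2]

-- the scan loop is lexicographic comparison of the scanned characters
theorem bBetterLoop_eq (base fsub : List Char) (m i b : Nat) : ∀ (ps : List Nat),
    bBetterLoop base fsub m i b ps
      = decide (ps.map (bCh base fsub m i) < ps.map (bCh base fsub m b))
  | [] => by simp [bBetterLoop]
  | p :: ps => by
    simp only [bBetterLoop, List.map_cons]
    split_ifs with hne
    · rw [eq_comm, decide_eq_decide]
      simp [List.cons_lt_cons_iff, hne]
    · have h : bCh base fsub m i p = bCh base fsub m b p := not_not.mp hne
      rw [bBetterLoop_eq base fsub m i b ps, decide_eq_decide, h]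
      exact (pv_lex_prefix [bCh base fsub m b p] _ _).symm

-- splitting a position range at b and k
theorem pv_range_split (N b k : Nat) (hbk : b ≤ k) (hk : k ≤ N) :
    List.range' 0 N = List.range' 0 b ++ List.range' b (k - b) ++ List.range' k (N - k) := by
  have h1 : List.range' 0 b ++ List.range' b (k - b) = List.range' 0 k := by
    have h := List.range'_append_1 (s := 0) (m := b) (n := k - b)
    rw [Nat.zero_add] at h
    rw [h]; congr 1; omega
  have h2 : List.range' 0 k ++ List.range' k (N - k) = List.range' 0 N := by
    have h := List.range'_append_1 (s := 0) (m := k) (n := N - k)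
    rw [Nat.zero_add] at h
    rw [h]; congr 1; omega
  rw [h1, h2]

-- the window comparison decides full-candidate lexicographic order
theorem bBetter_eq (w s : List Char) (i b : Nat) (hbi : b < i) (hi : i + s.length ≤ w.length) :
    bBetter (w.map fillChar) (s.map fillChar) s.length i b
      = decide (candL w s i < candL w s b) := by
  rw [bBetter, bBetterLoop_eq, decide_eq_decide]
  have hchunk : ∀ x : Nat, candL w s x
      = (List.range' 0 b).map (bCh (w.map fillChar) (s.map fillChar) s.length x)
        ++ (List.range' b (i + s.length - b)).map (bCh (w.map fillChar) (s.map fillChar) s.length x)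
        ++ (List.range' (i + s.length) (w.length - (i + s.length))).map (bCh (w.map fillChar) (s.map fillChar) s.length x) := by
    intro x
    unfold candL
    rw [List.range_eq_range', pv_range_split w.length b (i + s.length) (by omega) hi]
    simp only [List.map_append]
  have hpre : (List.range' 0 b).map (bCh (w.map fillChar) (s.map fillChar) s.length i)
      = (List.range' 0 b).map (bCh (w.map fillChar) (s.map fillChar) s.length b) :=
    List.map_congr_left (by intro p hp; rw [List.mem_range'_1] at hp; exact bCh_agree _ _ _ _ _ _ hbi (by omega))
  have hsuf : (List.range' (i + s.length) (w.length - (i + s.length))).map (bCh (w.map fillChar) (s.map fillChar) s.length i)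
      = (List.range' (i + s.length) (w.length - (i + s.length))).map (bCh (w.map fillChar) (s.map fillChar) s.length b) :=
    List.map_congr_left (by intro p hp; rw [List.mem_range'_1] at hp; exact bCh_agree _ _ _ _ _ _ hbi (by omega))
  rw [hchunk i, hchunk b, hpre, hsuf, List.append_assoc, List.append_assoc, pv_lex_prefix,
      pv_lex_suffix _ _ (by simp) _]
  by_cases hbm : b + s.length ≤ i
  · -- disjoint windows (possibly touching): skip the equal gap (b+m, i)
    rw [Nat.max_eq_left hbm, Nat.add_sub_cancel_left]
    have hsplit : List.range' b (i + s.length - b)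
        = List.range' b s.length ++ List.range' (b + s.length) (i - (b + s.length)) ++ List.range' i s.length := by
      have h1 : List.range' b s.length ++ List.range' (b + s.length) (i - (b + s.length)) = List.range' b (i - b) := by
        rw [List.range'_append_1]; congr 1; omega
      have h2 : List.range' b (i - b) ++ List.range' i s.length = List.range' b (i + s.length - b) := by
        have h := List.range'_append_1 (s := b) (m := i - b) (n := s.length)
        rw [show b + (i - b) = i from by omega] at h
        rw [h]; congr 1; omega
      rw [h1, h2]
    have hgap : (List.range' (b + s.length) (i - (b + s.length))).map (bCh (w.map fillChar) (s.map fillChar) s.length i)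
        = (List.range' (b + s.length) (i - (b + s.length))).map (bCh (w.map fillChar) (s.map fillChar) s.length b) :=
      List.map_congr_left (by intro p hp; rw [List.mem_range'_1] at hp; exact bCh_agree _ _ _ _ _ _ hbi (by omega))
    rw [hsplit]
    simp only [List.map_append]
    rw [hgap, pv_lex_mid _ _ (by simp) _ _ _]
  · -- overlapping windows: the scanned positions are exactly the contiguous block [b, i+m)
    rw [Nat.max_eq_right (by omega)]
    have h2 : List.range' b s.length ++ List.range' (b + s.length) (i + s.length - (b + s.length)) = List.range' b (i + s.length - b) := by
      rw [List.range'_append_1]; congr 1; omega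
    rw [h2]

-- String.ofList comparison is list comparison
theorem pv_ofList_lt (l1 l2 : List Char) : (String.ofList l1 < String.ofList l2) ↔ l1 < l2 := by
  simp [String.toList_ofList]

-- B's fold keeps its best index placeable
theorem fold_bound (w s : List Char) : ∀ (l : List Int),
    (∀ i ∈ l, 0 ≤ i ∧ i.toNat + s.length ≤ w.length) →
    ∀ (ob : Option Nat), (∀ bb, ob = some bb → bb + s.length ≤ w.length) →
    ∀ bb, (l.foldl (fun best i =>
        if ((PySem.List.slice w (some i) (some (i + (s.length : Int)))).zip s).all (fun q => q.1 == '?' || q.1 == q.2) then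
          match best with
          | none => some i.toNat
          | some b => if bBetter (w.map fillChar) (s.map fillChar) s.length i.toNat b then some i.toNat else some b
        else best) ob) = some bb → bb + s.length ≤ w.length
  | [], _, ob, hob, bb => by intro h; exact hob bb h
  | i :: l, hl, ob, hob, bb => by
    simp only [List.foldl_cons]
    apply fold_bound w s l (fun j hj => hl j (List.mem_cons_of_mem _ hj))
    intro b hb
    split_ifs at hb with hc
    · rcases ob with _ | b0
      · simp at hb; subst hb; exact (hl i (List.mem_cons_self ..)).2
      · simp only at hb
        split_ifs at hb with h2 <;> simp at hb <;> subst hb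
        · exact (hl i (List.mem_cons_self ..)).2
        · exact hob b0 rfl
    · exact hob b hb

-- the simulation: A's running best string is the candidate of B's running best index
theorem fold_sim (w s : List Char) : ∀ (l : List Int),
    (∀ i ∈ l, 0 ≤ i ∧ i.toNat + s.length ≤ w.length) →
    l.Pairwise (· < ·) →
    ∀ (ob : Option Nat),
    (∀ bb, ob = some bb → bb + s.length ≤ w.length ∧ ∀ i ∈ l, (bb : Int) < i) →
    l.foldl (fun best i =>
        match aMatchLoop w s i.toNat with
        | none => best
        | some cand =>
          let cs := String.ofList (cand.map (fun c => if c = '?' then 'a' else c))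
          match best with
          | none => some cs
          | some b => if cs < b then some cs else some b)
      (ob.map (fun b => String.ofList (candL w s b)))
    = (l.foldl (fun best i =>
        if ((PySem.List.slice w (some i) (some (i + (s.length : Int)))).zip s).all (fun q => q.1 == '?' || q.1 == q.2) then
          match best with
          | none => some i.toNat
          | some b => if bBetter (w.map fillChar) (s.map fillChar) s.length i.toNat b then some i.toNat else some b
        else best) ob).map (fun b => String.ofList (candL w s b))
  | [], _, _, ob, hob => by simp
  | i :: l, hl, hpw, ob, hob => by
    obtain ⟨h0, hin⟩ := hl i (List.mem_cons_self ..)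
    obtain ⟨p, rfl⟩ : ∃ p : Nat, i = (p : Int) := ⟨i.toNat, (Int.toNat_of_nonneg h0).symm⟩
    simp only [List.foldl_cons, Int.toNat_natCast] at *
    have hpw' := (List.pairwise_cons.mp hpw).2
    have hhead := (List.pairwise_cons.mp hpw).1
    rw [aMatchLoop_eq s w p hin]
    rw [show ((p : Int) + (s.length : Int)) = ((p + s.length : Nat) : Int) by push_cast; ring,
        PySem.List.slice_natCast]
    rw [show p + s.length - p = s.length by omega]
    by_cases hc : (((w.drop p).take s.length).zip s).all (fun q => q.1 == '?' || q.1 == q.2) = true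
    · rw [if_pos hc, if_pos hc]
      have hcand : (w.take p ++ s ++ w.drop (p + s.length)).map (fun c => if c = '?' then 'a' else c)
          = candL w s p := by
        rw [candL_eq w s p hin]
        simp only [List.map_append, List.map_take, List.map_drop]
        rfl
      rcases ob with _ | bb
      · simp only [Option.map_none]
        rw [show (some (String.ofList ((w.take p ++ s ++ w.drop (p + s.length)).map (fun c => if c = '?' then 'a' else c))))
              = Option.map (fun b => String.ofList (candL w s b)) (some p) by rw [hcand]; rfl]
        exact fold_sim w s l (fun j hj => hl j (List.mem_cons_of_mem _ hj)) hpw' (some p)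
          (by intro bb hbb; cases hbb; exact ⟨hin, fun j hj => hhead j hj⟩)
      · obtain ⟨hbb, hblt⟩ := hob bb rfl
        have hbp : bb < p := by exact_mod_cast hblt _ (List.mem_cons_self ..)
        simp only [Option.map_some]
        rw [hcand, bBetter_eq w s p bb hbp hin]
        by_cases hlt : candL w s p < candL w s bb
        · rw [if_pos ((pv_ofList_lt _ _).mpr hlt), if_pos (by simpa using hlt)]
          rw [show (some (String.ofList (candL w s p))) = Option.map (fun b => String.ofList (candL w s b)) (some p) from rfl]
          exact fold_sim w s l (fun j hj => hl j (List.mem_cons_of_mem _ hj)) hpw' (some p)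
            (by intro b hb; cases hb; exact ⟨hin, fun j hj => hhead j hj⟩)
        · rw [if_neg (fun h => hlt ((pv_ofList_lt _ _).mp h)), if_neg (by simpa using hlt)]
          rw [show (some (String.ofList (candL w s bb))) = Option.map (fun b => String.ofList (candL w s b)) (some bb) from rfl]
          exact fold_sim w s l (fun j hj => hl j (List.mem_cons_of_mem _ hj)) hpw' (some bb)
            (by intro b hb; cases hb; exact ⟨hbb, fun j hj => lt_trans (hblt _ (List.mem_cons_self ..)) (hhead j hj)⟩)
    · rw [if_neg hc, if_neg hc]
      exact fold_sim w s l (fun j hj => hl j (List.mem_cons_of_mem _ hj)) hpw' ob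
        (by intro b hb; obtain ⟨h1, h2⟩ := hob b hb; exact ⟨h1, fun j hj => h2 j (List.mem_cons_of_mem _ hj)⟩)

-- ===== VERDICT (by name: the statement is the Claim_ definition above) =====
theorem findSmallestString_spec : Claim_unchanged_findSmallestString := by
  intro word substr _
  unfold Spec_findSmallestString
  intro hnd
  simp only [findSmallestString, findSmallestString_alt]
  set w := word.toList with hw
  set s := substr.toList with hs
  have hmem : ∀ i ∈ PySem.List.pyRange 0 ((w.length : Int) - (s.length : Int) + 1) 1,
      0 ≤ i ∧ i.toNat + s.length ≤ w.length := by
    intro i hi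
    obtain ⟨h1, h2⟩ := PySem.List.mem_pyRange_one.mp hi
    exact ⟨h1, by omega⟩
  have hsim := fold_sim w s (PySem.List.pyRange 0 ((w.length : Int) - (s.length : Int) + 1) 1)
    hmem (PySem.List.pairwise_lt_pyRange_one _ _) none (by intro bb hbb; cases hbb)
  simp only [Option.map_none] at hsim
  rw [hsim]
  rcases hfold : List.foldl
      (fun best i =>
        if (((PySem.List.slice w (some i) (some (i + (s.length : Int)))).zip s).all fun q => q.1 == '?' || q.1 == q.2) = true then
          match best with
          | none => some i.toNat
          | some b => if bBetter (List.map fillChar w) (List.map fillChar s) s.length i.toNat b = true then some i.toNat else some b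
        else best)
      none (PySem.List.pyRange 0 ((w.length : Int) - (s.length : Int) + 1) 1) with _ | bb
  · rfl
  · have hbb : bb + s.length ≤ w.length :=
      fold_bound w s _ hmem none (by intro b hb'; cases hb') bb hfold
    simp only [Option.map_some]
    rw [candL_eq w s bb hbb]
    have hwne : w ≠ [] := by
      intro hwe
      apply hnd
      have hse : s = [] := by rw [hwe] at hbb; simp at hbb; exact hbb.2
      rw [hw] at hwe
      rw [hs] at hse
      exact ⟨String.toList_eq_nil_iff.mp hwe, String.toList_eq_nil_iff.mp hse⟩
    have hne : String.ofList ((w.map fillChar).take bb ++ s.map fillChar ++ (w.map fillChar).drop (bb + s.length)) ≠ "" := by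
      intro he
      have ht := congrArg String.toList he
      rw [String.toList_ofList] at ht
      have h0 := congrArg List.length ht
      simp at h0
      obtain ⟨h1, h2, h3⟩ := h0
      have hs0 : s.length = 0 := by rw [h2]; rfl
      rcases h1 with h1 | h1
      · exact hwne (List.eq_nil_of_length_eq_zero (by omega))
      · exact hwne h1
    rw [if_neg hne]

theorem findSmallestString_changed : Claim_changed_findSmallestString := by
  unfold Claim_changed_findSmallestString; decide

theorem findSmallestString_tight : Claim_exact_findSmallestString := by
  intro word substr _ hd
  obtain ⟨hw, hs⟩ := hd
  subst hw; subst hs; decide
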